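-- pv_equiv track=rewrite | github.com/ML-TANGO/TANGO2 | GenAI_Platform/apps/fb_scheduler/src/scheduler/scheduler.py | get_optimal_gpus
-- ===== SOURCE A (Python) =====
-- from collections import defaultdict
-- from typing import List
--
-- def get_optimal_gpus(data: List[dict], num_gpus: int):
--     """
--     {
--     "node-A": ["GPU1", "GPU2"],
--     "node-B": ["GPU3"],
--     ...
--     } 형식으로 정리 후에 가용 GPU가 많은 노드부터 순서대로 할당
--
--     """
--     nodes = defaultdict(list)
--     for item in data:
--         nodes[item["node_name"]].append(item["gpu_uuid"])
--     sorted_nodes = sorted(nodes.items(), key=lambda x: len(x[1]), reverse=True)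
--
--     result = []
--     remaining_gpus = num_gpus
--
--     for node, gpus in sorted_nodes:
--         if remaining_gpus <= 0:
--             break
--         if len(gpus) >= remaining_gpus:
--             result.extend([{"node_name": node, "gpu_uuid": gpu} for gpu in gpus[:remaining_gpus]])
--             remaining_gpus = 0
--         else:
--             result.extend([{"node_name": node, "gpu_uuid": gpu} for gpu in gpus])
--             remaining_gpus -= len(gpus)
--     return result
-- ===== SOURCE B (Python) =====
-- from collections import Counter
-- from typing import List
--
-- def get_optimal_gpus(data: List[dict], num_gpus: int):
--     # Rank every GPU entry directly with a single decorate-sort: items sort by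
--     # (node's GPU count desc, node's first position, own position) and the first
--     # num_gpus entries are the allocation.  No per-node grouping or greedy loop.
--     count = Counter(item["node_name"] for item in data)
--     first = {}
--     for i, item in enumerate(data):
--         first.setdefault(item["node_name"], i)
--     ranked = sorted(
--         enumerate(data),
--         key=lambda p: (-count[p[1]["node_name"]], first[p[1]["node_name"]], p[0]),
--     )
--     k = max(num_gpus, 0)
--     return [{"node_name": item["node_name"], "gpu_uuid": item["gpu_uuid"]}
--             for _, item in ranked[:k]]
-- ===== Notes on version B (the rewrite author's own statement) =====
-- stated objective: alternative
-- what changed: Replaces A's group-into-dict-of-lists, sort-the-groups and greedy per-node allocation loop (remaining_gpus accumulator, two extend branches, break) with a single decorate-sort: each GPU entry is ranked directly by the key (node GPU count desc, node first position, own position) and the first num_gpus ranked entries are returned.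
import Mathlib
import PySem

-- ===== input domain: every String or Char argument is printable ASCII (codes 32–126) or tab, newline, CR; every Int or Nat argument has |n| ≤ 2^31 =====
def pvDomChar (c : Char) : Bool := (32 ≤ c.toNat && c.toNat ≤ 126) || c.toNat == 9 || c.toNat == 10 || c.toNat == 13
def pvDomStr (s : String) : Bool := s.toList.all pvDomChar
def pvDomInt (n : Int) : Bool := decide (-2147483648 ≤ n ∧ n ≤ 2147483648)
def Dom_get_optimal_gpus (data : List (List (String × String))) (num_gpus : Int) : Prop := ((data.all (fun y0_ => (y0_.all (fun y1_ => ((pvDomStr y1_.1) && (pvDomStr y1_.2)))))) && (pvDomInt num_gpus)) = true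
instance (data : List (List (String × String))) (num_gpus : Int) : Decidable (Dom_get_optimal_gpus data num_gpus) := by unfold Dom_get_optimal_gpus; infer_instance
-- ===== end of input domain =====

-- B replaces A's group-then-greedily-allocate structure with a single decorate-sort of the
-- GPU entries themselves (key: node GPU count desc, node first position, own position) and a
-- slice; objective: alternative (same cost, different algorithm).

-- ===== PORT A =====
-- the dict literal {"node_name": node, "gpu_uuid": gpu}
def pvEntry (node gpu : String) : List (String × String) :=
  [("node_name", node), ("gpu_uuid", gpu)]

-- A's allocation loop over sorted_nodes, carrying result and remaining_gpus (break = stop recursion)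
def pvAllocA : List (String × List String) → Int → List (List (String × String)) → List (List (String × String))
  | [], _, result => result
  | (node, gpus) :: rest, remaining, result =>
    if remaining ≤ 0 then result
    else if (gpus.length : Int) ≥ remaining then
      pvAllocA rest 0 (result ++ (PySem.List.slice gpus none (some remaining)).map (fun gpu => pvEntry node gpu))
    else
      pvAllocA rest (remaining - (gpus.length : Int)) (result ++ gpus.map (fun gpu => pvEntry node gpu))

def get_optimal_gpus (data : List (List (String × String))) (num_gpus : Int) : List (List (String × String)) :=
  let nodes := data.foldl
    (fun d item => d.modify ((PySem.Dict.mk item).getD "node_name" "") []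
      (· ++ [(PySem.Dict.mk item).getD "gpu_uuid" ""])) PySem.Dict.empty
  let sorted_nodes := PySem.List.sorted nodes.items (fun x => (x.2.length : Int)) true
  pvAllocA sorted_nodes num_gpus []

-- ===== PORT B =====
-- Source B: rank the entries directly.  Python's tuple comparison in the sort key is
-- lexicographic; it is modelled exactly by the nested `toLex` pairs.
def get_optimal_gpus_alt (data : List (List (String × String))) (num_gpus : Int) : List (List (String × String)) :=
  let count := PySem.Dict.counter (data.map (fun item => (PySem.Dict.mk item).getD "node_name" ""))
  let first := (PySem.List.enumerate data).foldl
    (fun d p => d.setdefault ((PySem.Dict.mk p.2).getD "node_name" "") p.1) PySem.Dict.empty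
  let ranked := PySem.List.sorted (PySem.List.enumerate data)
    (fun p => toLex (-(count.getD ((PySem.Dict.mk p.2).getD "node_name" "") 0),
        toLex (first.getD ((PySem.Dict.mk p.2).getD "node_name" "") 0, p.1))) false
  let k := max num_gpus 0
  (PySem.List.slice ranked none (some k)).map
    (fun p => pvEntry ((PySem.Dict.mk p.2).getD "node_name" "") ((PySem.Dict.mk p.2).getD "gpu_uuid" ""))

-- ===== PRECONDITION & SPEC =====
-- Pre_ excludes exactly the items lacking a "node_name" or "gpu_uuid" key, where Python A raises KeyError.
def Pre_get_optimal_gpus (data : List (List (String × String))) (num_gpus : Int) : Prop :=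
  ∀ item ∈ data, (PySem.Dict.mk item).contains "node_name" = true ∧ (PySem.Dict.mk item).contains "gpu_uuid" = true
instance (data : List (List (String × String))) (num_gpus : Int) : Decidable (Pre_get_optimal_gpus data num_gpus) := by unfold Pre_get_optimal_gpus; infer_instance

def pvWitness_get_optimal_gpus : (List (List (String × String))) × Int :=
  ([[("node_name", "n1"), ("gpu_uuid", "g1")], [("node_name", "n2"), ("gpu_uuid", "g2")]], 1)

def Spec_get_optimal_gpus (data : List (List (String × String))) (num_gpus : Int) (out : List (List (String × String))) : Prop := out = get_optimal_gpus_alt data num_gpus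
instance (data : List (List (String × String))) (num_gpus : Int) (out : List (List (String × String))) : Decidable (Spec_get_optimal_gpus data num_gpus out) := by unfold Spec_get_optimal_gpus; infer_instance

-- ===== CLAIM (what is proved, stated in full; the proofs are below) =====
def Claim_equal_get_optimal_gpus : Prop := ∀ (data : List (List (String × String))) (num_gpus : Int), Dom_get_optimal_gpus data num_gpus → Pre_get_optimal_gpus data num_gpus → Spec_get_optimal_gpus data num_gpus (get_optimal_gpus data num_gpus)

-- ===== LEMMAS AND PROOFS =====

-- abbreviations for the two field lookups and the derived per-node data
def nmF (it : List (String × String)) : String := (PySem.Dict.mk it).getD "node_name" ""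
def gpF (it : List (String × String)) : String := (PySem.Dict.mk it).getD "gpu_uuid" ""
def pvNames (data : List (List (String × String))) : List String := data.map nmF
def pvCnt (data : List (List (String × String))) (n : String) : Int := (List.count n (pvNames data) : Int)
def pvFst (data : List (List (String × String))) (n : String) : Int := (List.idxOf n (pvNames data) : Int)
def pvKn (data : List (List (String × String))) (n : String) : Int ×ₗ Int := toLex (-(pvCnt data n), pvFst data n)
def pvKeyB (data : List (List (String × String))) (p : Int × List (String × String)) : Int ×ₗ (Int ×ₗ Int) :=
  toLex (-(pvCnt data (nmF p.2)), toLex (pvFst data (nmF p.2), p.1))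
def pvGroup (data : List (List (String × String))) (n : String) : List String :=
  (data.filter (fun it => nmF it == n)).map gpF
def pvF (data : List (List (String × String))) (n : String) : String × List String := (n, pvGroup data n)
def pvBlock (data : List (List (String × String))) (n : String) : List (Int × List (String × String)) :=
  (PySem.List.enumerate data).filter (fun p => nmF p.2 == n)

theorem nmF_def (it : List (String × String)) : (PySem.Dict.mk it).getD "node_name" "" = nmF it := rfl
theorem gpF_def (it : List (String × String)) : (PySem.Dict.mk it).getD "gpu_uuid" "" = gpF it := rfl

-- A's allocation loop computes acc ++ take of the flattened groups
theorem pvAllocA_eq_take (groups : List (String × List String)) :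
    ∀ (r : Int) (acc : List (List (String × String))),
    pvAllocA groups r acc =
      acc ++ (groups.flatMap (fun p => p.2.map (fun gpu => pvEntry p.1 gpu))).take r.toNat := by
  induction groups with
  | nil => intro r acc; simp [pvAllocA]
  | cons hd tl ih =>
    intro r acc
    obtain ⟨node, gpus⟩ := hd
    by_cases h0 : r ≤ 0
    · have : r.toNat = 0 := by omega
      simp [pvAllocA, h0, this]
    · by_cases h1 : (gpus.length : Int) ≥ r
      · have hs : PySem.List.slice gpus none (some r) = gpus.take r.toNat :=
          PySem.List.slice_to gpus (b := r) (by omega)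
        simp only [pvAllocA, if_neg h0, if_pos h1, ih, hs]
        have ht : r.toNat ≤ (gpus.map (fun gpu => pvEntry node gpu)).length := by
          simp; omega
        rw [List.flatMap_cons, List.take_append, Nat.sub_eq_zero_of_le ht, List.take_zero,
          ← List.map_take, List.append_assoc]
        simp
      · simp only [pvAllocA, if_neg h0, if_neg h1, ih]
        rw [List.flatMap_cons, List.take_append]
        have hlen : (gpus.map (fun gpu => pvEntry node gpu)).length = gpus.length := by simp
        have hge : (gpus.map (fun gpu => pvEntry node gpu)).length ≤ r.toNat := by
          rw [hlen]; omega
        rw [List.take_of_length_le hge]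
        have : r.toNat - (gpus.map (fun gpu => pvEntry node gpu)).length = (r - (gpus.length : Int)).toNat := by
          rw [hlen]; omega
        rw [this, List.append_assoc]

-- generic insertion-sort plumbing -------------------------------------------------

theorem pv_insertBy_congr {α : Type} (b1 b2 : α → α → Bool) (x : α) :
    ∀ l : List α, (∀ y ∈ l, b1 x y = b2 x y) →
      PySem.List.insertBy b1 x l = PySem.List.insertBy b2 x l := by
  intro l
  induction l with
  | nil => intro _; rfl
  | cons y ys ih =>
    intro h
    show (if b1 x y then x :: y :: ys else y :: PySem.List.insertBy b1 x ys)
        = (if b2 x y then x :: y :: ys else y :: PySem.List.insertBy b2 x ys)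
    rw [h y (by simp)]
    by_cases hb : b2 x y
    · simp [hb]
    · simp [hb, ih (fun z hz => h z (by simp [hz]))]

theorem pv_foldl_insertBy_congr {α : Type} (b1 b2 : α → α → Bool) :
    ∀ (N acc : List α), N.Pairwise (fun y x => b1 x y = b2 x y) →
      (∀ x ∈ N, ∀ y ∈ acc, b1 x y = b2 x y) →
      N.foldl (fun a x => PySem.List.insertBy b1 x a) acc
        = N.foldl (fun a x => PySem.List.insertBy b2 x a) acc := by
  intro N
  induction N with
  | nil => intro acc _ _; rfl
  | cons n N' ih =>
    intro acc hpw hacc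
    rw [List.foldl_cons, List.foldl_cons,
      pv_insertBy_congr b1 b2 n acc (hacc n (by simp))]
    refine ih _ (List.Pairwise.of_cons hpw) ?_
    intro x hx y hy
    rw [PySem.List.mem_insertBy] at hy
    rcases hy with rfl | hy
    · exact (List.pairwise_cons.mp hpw).1 x hx
    · exact hacc x (by simp [hx]) y hy

theorem pv_insertBy_map {α β : Type} (f : α → β) (b : β → β → Bool) (b' : α → α → Bool)
    (h : ∀ a c, b (f a) (f c) = b' a c) (x : α) :
    ∀ l : List α, PySem.List.insertBy b (f x) (l.map f) = (PySem.List.insertBy b' x l).map f := by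
  intro l
  induction l with
  | nil => rfl
  | cons y ys ih =>
    rw [List.map_cons]
    show (if b (f x) (f y) then f x :: f y :: ys.map f else f y :: PySem.List.insertBy b (f x) (ys.map f))
        = (if b' x y then x :: y :: ys else y :: PySem.List.insertBy b' x ys).map f
    rw [h x y]
    by_cases hb : b' x y
    · simp [hb]
    · simp [hb, ih]

theorem pv_foldl_insertBy_map {α β : Type} (f : α → β) (b : β → β → Bool) (b' : α → α → Bool)
    (h : ∀ a c, b (f a) (f c) = b' a c) :
    ∀ (N l : List α), (N.map f).foldl (fun a q => PySem.List.insertBy b q a) (l.map f)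
      = (N.foldl (fun a n => PySem.List.insertBy b' n a) l).map f := by
  intro N
  induction N with
  | nil => intro l; rfl
  | cons n N' ih =>
    intro l
    rw [List.map_cons, List.foldl_cons, List.foldl_cons, pv_insertBy_map f b b' h n l]
    exact ih (PySem.List.insertBy b' n l)

theorem pv_sorted_key_congr {α κ : Type} [LT κ] [DecidableLT κ] (xs : List α) (k1 k2 : α → κ)
    (h : ∀ x ∈ xs, k1 x = k2 x) :
    PySem.List.sorted xs k1 false = PySem.List.sorted xs k2 false := by
  rw [PySem.List.sorted_eq_foldl_insertBy, PySem.List.sorted_eq_foldl_insertBy]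
  apply pv_foldl_insertBy_congr
  · exact List.pairwise_of_forall_mem_list
      (fun a ha b hb => by rw [h a ha, h b hb])
  · intro x _ y hy
    exact absurd hy (List.not_mem_nil)

-- first-occurrence order of the distinct names ------------------------------------

theorem pv_ofList_pairwise_idxOf (l : List String) :
    (PySem.Set.ofList l).Pairwise (fun a b => List.idxOf a l < List.idxOf b l) := by
  induction l using List.reverseRecOn with
  | nil => exact List.Pairwise.nil
  | append_singleton l x ih =>
    rw [PySem.Set.ofList_eq_foldl, List.foldl_append, List.foldl_cons, List.foldl_nil,
      ← PySem.Set.ofList_eq_foldl]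
    have hmem : ∀ a ∈ PySem.Set.ofList l, a ∈ l := fun a ha => (PySem.Set.mem_ofList l a).mp ha
    by_cases hx : x ∈ l
    · rw [show PySem.Set.add (PySem.Set.ofList l) x = PySem.Set.ofList l by
        simp [PySem.Set.add, hx]]
      refine ih.imp_of_mem ?_
      intro a b ha hb hab
      rw [List.idxOf_append, List.idxOf_append, if_pos (hmem a ha), if_pos (hmem b hb)]
      exact hab
    · rw [show PySem.Set.add (PySem.Set.ofList l) x = PySem.Set.ofList l ++ [x] by
        simp [PySem.Set.add, hx]]
      rw [List.pairwise_append]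
      refine ⟨?_, List.pairwise_singleton _ _, ?_⟩
      · refine ih.imp_of_mem ?_
        intro a b ha hb hab
        rw [List.idxOf_append, List.idxOf_append, if_pos (hmem a ha), if_pos (hmem b hb)]
        exact hab
      · intro a ha b hb
        rw [List.mem_singleton] at hb
        subst hb
        rw [List.idxOf_append, List.idxOf_append, if_pos (hmem a ha), if_neg hx]
        have h1 : List.idxOf a l < l.length := List.idxOf_lt_length_of_mem (hmem a ha)
        simp [List.idxOf_cons_self]
        omega

-- the grouping dict of port A -----------------------------------------------------

theorem pv_nodes_items (data : List (List (String × String))) :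
    (data.foldl (fun d item => d.modify (nmF item) [] (· ++ [gpF item])) PySem.Dict.empty).items
      = (PySem.Set.ofList (pvNames data)).map (pvF data) := by
  have h1 : data.foldl (fun d item => d.modify (nmF item) [] (· ++ [gpF item])) PySem.Dict.empty
      = (data.map (fun it => (nmF it, gpF it))).foldl
          (fun d p => d.modify p.1 [] (· ++ [p.2])) PySem.Dict.empty := by
    rw [List.foldl_map]
  rw [h1]
  have hkeys : ((data.map (fun it => (nmF it, gpF it))).foldl
      (fun d p => d.modify p.1 [] (· ++ [p.2])) PySem.Dict.empty).keys
        = PySem.Set.ofList (pvNames data) := by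
    have hk := PySem.Dict.keys_foldl_modify_key (data.map (fun it => (nmF it, gpF it)))
      (fun p => p.1) ([] : List String) (fun _ p => (· ++ [p.2])) PySem.Dict.empty
    rw [hk, PySem.Dict.keys_empty, List.map_map]
    rw [PySem.Set.ofList_eq_foldl]
    rfl
  have hnodup : ((data.map (fun it => (nmF it, gpF it))).foldl
      (fun d p => d.modify p.1 [] (· ++ [p.2])) PySem.Dict.empty).keys.Nodup :=
    PySem.Dict.nodup_keys_foldl_modify_key (data.map (fun it => (nmF it, gpF it)))
      (fun p => p.1) ([] : List String) (fun _ p => (· ++ [p.2])) PySem.Dict.empty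
      PySem.Dict.nodup_keys_empty
  rw [PySem.Dict.items_eq_map_keys _ hnodup ([] : List String), hkeys]
  apply List.map_congr_left
  intro n _
  have hg := PySem.Dict.getD_foldl_modify_append (data.map (fun it => (nmF it, gpF it)))
    PySem.Dict.empty n
  rw [hg, PySem.Dict.getD_empty, List.nil_append]
  unfold pvF pvGroup
  rw [List.filter_map, List.map_map]
  rfl

-- the `first` dict of port B ------------------------------------------------------

theorem pv_first_inv (l : List (List (String × String))) :
    (∀ n, ((PySem.List.enumerate l).foldl (fun d p => d.setdefault (nmF p.2) p.1) PySem.Dict.empty).contains n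
        = decide (n ∈ pvNames l))
    ∧ (∀ n ∈ pvNames l, ((PySem.List.enumerate l).foldl (fun d p => d.setdefault (nmF p.2) p.1) PySem.Dict.empty).getD n 0
        = pvFst l n) := by
  induction l using List.reverseRecOn with
  | nil =>
    constructor
    · intro n; simp [PySem.List.enumerate, pvNames, PySem.Dict.contains_empty]
    · intro n hn; simp [pvNames] at hn
  | append_singleton l x ih =>
    have he : PySem.List.enumerate (l ++ [x])
        = PySem.List.enumerate l ++ [((l.length : Int), x)] := by
      rw [PySem.List.enumerate_append]
      simp [PySem.List.enumerate]
    rw [he, List.foldl_append, List.foldl_cons, List.foldl_nil]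
    obtain ⟨ihc, ihg⟩ := ih
    have hnames : pvNames (l ++ [x]) = pvNames l ++ [nmF x] := by
      simp [pvNames]
    by_cases hx : nmF x ∈ pvNames l
    · rw [PySem.Dict.setdefault_of_contains _ _ (by rw [ihc]; simpa using hx)]
      constructor
      · intro n
        rw [ihc, hnames]
        by_cases hn : n = nmF x
        · subst hn; simp [hx]
        · simp [hn]
      · intro n hn
        have hn' : n ∈ pvNames l := by
          rw [hnames] at hn
          rcases List.mem_append.mp hn with h | h
          · exact h
          · rw [List.mem_singleton] at h; subst h; exact hx
        rw [ihg n hn']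
        unfold pvFst
        rw [hnames, List.idxOf_append, if_pos hn']
    · rw [PySem.Dict.setdefault_of_not_contains _ _ (by rw [ihc]; simpa using hx)]
      constructor
      · intro n
        rw [PySem.Dict.contains_insert, ihc, hnames]
        by_cases hn : n = nmF x
        · subst hn; simp
        · simp [hn]
      · intro n hn
        rw [PySem.Dict.getD_insert]
        by_cases hnx : n = nmF x
        · rw [if_pos hnx, hnx]
          unfold pvFst
          rw [hnames, List.idxOf_append, if_neg hx, List.idxOf_cons_self]
          simp [pvNames]
        · rw [if_neg hnx]
          have hn' : n ∈ pvNames l := by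
            rw [hnames] at hn
            rcases List.mem_append.mp hn with h | h
            · exact h
            · rw [List.mem_singleton] at h; exact absurd h hnx
          rw [ihg n hn']
          unfold pvFst
          rw [hnames, List.idxOf_append, if_pos hn']

-- the length of a node's group is its multiplicity among the names ----------------

theorem pv_len_group (data : List (List (String × String))) (n : String) :
    ((pvGroup data n).length : Int) = pvCnt data n := by
  have h : (data.filter (fun it => nmF it == n)).length = List.count n (pvNames data) := by
    rw [List.count_eq_countP]
    unfold pvNames
    rw [List.countP_map, List.countP_eq_length_filter]
    rfl
  unfold pvGroup pvCnt
  rw [List.length_map, h]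

-- A's reverse sort of the grouped pairs is the strict lex sort of the names -------

theorem pv_sortA (data : List (List (String × String))) :
    PySem.List.sorted ((PySem.Set.ofList (pvNames data)).map (pvF data)) (fun q => (q.2.length : Int)) true
      = (PySem.List.sorted (PySem.Set.ofList (pvNames data)) (pvKn data) false).map (pvF data) := by
  rw [PySem.List.sorted_rev_eq_foldl_insertBy, PySem.List.sorted_eq_foldl_insertBy]
  have hcompat : ∀ a c, (fun q q' => decide (((q'.2 : List String).length : Int) < ((q.2 : List String).length : Int)))
      (pvF data a) (pvF data c) = decide (pvCnt data c < pvCnt data a) := by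
    intro a c
    show decide (((pvGroup data c).length : Int) < ((pvGroup data a).length : Int)) = _
    rw [pv_len_group, pv_len_group]
  have h2 := pv_foldl_insertBy_map (pvF data)
    (fun q q' => decide (((q'.2 : List String).length : Int) < ((q.2 : List String).length : Int)))
    (fun a c => decide (pvCnt data c < pvCnt data a)) hcompat
    (PySem.Set.ofList (pvNames data)) []
  rw [show (List.map (pvF data) []) = ([] : List (String × List String)) from rfl] at h2
  rw [h2]
  congr 1
  apply pv_foldl_insertBy_congr
  · refine (pv_ofList_pairwise_idxOf (pvNames data)).imp_of_mem ?_
    intro a b ha hb hab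
    have hfst : pvFst data a < pvFst data b := by
      unfold pvFst; exact_mod_cast hab
    apply decide_eq_decide.mpr
    unfold pvKn
    rw [Prod.Lex.lt_iff]
    simp only [ofLex_toLex]
    omega
  · intro x _ y hy
    exact absurd hy (List.not_mem_nil)

-- a nodup covering family of filters is a partition up to permutation -------------

theorem pv_part (N : List String) :
    ∀ E : List (Int × List (String × String)), N.Nodup → (∀ p ∈ E, nmF p.2 ∈ N) →
      (N.flatMap (fun n => E.filter (fun p => nmF p.2 == n))).Perm E := by
  induction N with
  | nil =>
    intro E _ hcov
    have hE : E = [] := by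
      cases E with
      | nil => rfl
      | cons e E' => exact absurd (hcov e (by simp)) (List.not_mem_nil)
    simp [hE]
  | cons n N' ih =>
    intro E hnd hcov
    rw [List.flatMap_cons]
    have hnd' := List.nodup_cons.mp hnd
    have htail : N'.flatMap (fun m => E.filter (fun p => nmF p.2 == m))
        = N'.flatMap (fun m => (E.filter (fun p => !(nmF p.2 == n))).filter (fun p => nmF p.2 == m)) := by
      rw [List.flatMap_def, List.flatMap_def]
      congr 1
      apply List.map_congr_left
      intro m hm
      rw [List.filter_filter]
      apply List.filter_congr
      intro p _
      by_cases hpm : nmF p.2 == m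
      · have heq : nmF p.2 = m := eq_of_beq hpm
        have hmn : (nmF p.2 == n) = false := by
          rw [heq]
          exact beq_false_of_ne (fun h => hnd'.1 (h ▸ hm))
        simp [hpm, hmn]
      · simp [hpm]
    rw [htail]
    have hcov' : ∀ p ∈ E.filter (fun p => !(nmF p.2 == n)), nmF p.2 ∈ N' := by
      intro p hp
      have hpE := List.mem_filter.mp hp
      have h1 := hcov p hpE.1
      rw [List.mem_cons] at h1
      rcases h1 with h | h
      · exfalso
        rw [h] at hpE
        simp at hpE
      · exact h
    have hperm' := ih (E.filter (fun p => !(nmF p.2 == n))) hnd'.2 hcov'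
    exact List.Perm.trans
      (List.Perm.append_left (E.filter (fun p => nmF p.2 == n)) hperm')
      (List.filter_append_perm (fun p => nmF p.2 == n) E)

-- B's sort is the block decomposition ---------------------------------------------

theorem pv_sortB (data : List (List (String × String))) :
    PySem.List.sorted (PySem.List.enumerate data) (pvKeyB data) false
      = (PySem.List.sorted (PySem.Set.ofList (pvNames data)) (pvKn data) false).flatMap (pvBlock data) := by
  apply PySem.List.sorted_eq_of_perm_of_pairwise_lt
  · refine List.Perm.trans
      (List.Perm.flatMap (PySem.List.sorted_perm (PySem.Set.ofList (pvNames data)) (pvKn data) false)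
        (fun a _ => List.Perm.refl _))
      (pv_part (PySem.Set.ofList (pvNames data)) (PySem.List.enumerate data)
        (PySem.Set.nodup_ofList _) ?_)
    intro p hp
    rw [PySem.Set.mem_ofList]
    obtain ⟨k, hk, rfl⟩ := (PySem.List.mem_enumerate_iff data 0 p).mp hp
    exact List.mem_map_of_mem (List.getElem_mem hk)
  · rw [List.flatMap_def, List.pairwise_flatten]
    constructor
    · intro bl hbl
      obtain ⟨n, _, rfl⟩ := List.mem_map.mp hbl
      refine ((PySem.List.pairwise_lt_enumerate data 0).filter (fun p => nmF p.2 == n)).imp_of_mem ?_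
      intro a b ha hb hlt
      have hna : nmF a.2 = n := eq_of_beq (List.mem_filter.mp ha).2
      have hnb : nmF b.2 = n := eq_of_beq (List.mem_filter.mp hb).2
      unfold pvKeyB
      rw [hna, hnb]
      exact Prod.Lex.lt_iff.mpr (Or.inr ⟨rfl, Prod.Lex.lt_iff.mpr (Or.inr ⟨rfl, hlt⟩)⟩)
    · rw [List.pairwise_map]
      have hperm := PySem.List.sorted_perm (PySem.Set.ofList (pvNames data)) (pvKn data) false
      have hnd : (PySem.List.sorted (PySem.Set.ofList (pvNames data)) (pvKn data) false).Nodup :=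
        hperm.nodup_iff.mpr (PySem.Set.nodup_ofList _)
      have hle := PySem.List.sorted_pairwise (PySem.Set.ofList (pvNames data)) (pvKn data)
      have hstrict : (PySem.List.sorted (PySem.Set.ofList (pvNames data)) (pvKn data) false).Pairwise
          (fun a b => pvKn data a < pvKn data b) := by
        refine (hnd.and hle).imp_of_mem ?_
        intro a b ha hb hab
        refine lt_of_le_of_ne hab.2 (fun hEq => hab.1 ?_)
        have ha' : a ∈ pvNames data := by
          have := (PySem.List.mem_sorted _ _ _ _).mp ha
          exact (PySem.Set.mem_ofList _ _).mp this
        have hb' : b ∈ pvNames data := by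
          have := (PySem.List.mem_sorted _ _ _ _).mp hb
          exact (PySem.Set.mem_ofList _ _).mp this
        have h2 : pvFst data a = pvFst data b := by
          have := congrArg (fun z => (ofLex z).2) hEq
          simpa [pvKn] using this
        have h3 : List.idxOf a (pvNames data) = List.idxOf b (pvNames data) := by
          unfold pvFst at h2; exact_mod_cast h2
        exact (List.idxOf_inj ha').mp h3
      refine hstrict.imp ?_
      intro a b hab x hx y hy
      have hnx : nmF x.2 = a := eq_of_beq (List.mem_filter.mp hx).2
      have hny : nmF y.2 = b := eq_of_beq (List.mem_filter.mp hy).2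
      unfold pvKn at hab
      rw [Prod.Lex.lt_iff] at hab
      simp only [ofLex_toLex] at hab
      unfold pvKeyB
      rw [hnx, hny, Prod.Lex.lt_iff]
      simp only [ofLex_toLex]
      rcases hab with h | ⟨h1, h2⟩
      · left; exact h
      · right
        refine ⟨by omega, ?_⟩
        rw [Prod.Lex.lt_iff]
        simp only [ofLex_toLex]
        left; exact h2

-- per-node blocks map to the same entries -----------------------------------------

theorem pv_enum_filter_map {β : Type} (pred : List (String × String) → Bool)
    (h : List (String × String) → β) :
    ∀ (l : List (List (String × String))) (s : Int),
      ((PySem.List.enumerate l s).filter (fun p => pred p.2)).map (fun p => h p.2)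
        = (l.filter pred).map h := by
  intro l
  induction l with
  | nil => intro s; rfl
  | cons a l ih =>
    intro s
    rw [PySem.List.enumerate_cons]
    by_cases hp : pred a
    · rw [List.filter_cons_of_pos (by simpa using hp), List.filter_cons_of_pos hp,
        List.map_cons, ih (s + 1)]
      rfl
    · rw [List.filter_cons_of_neg (by simpa using hp), List.filter_cons_of_neg hp, ih (s + 1)]

theorem pv_block_map (data : List (List (String × String))) (n : String) :
    (pvBlock data n).map (fun p => pvEntry (nmF p.2) (gpF p.2))
      = (pvGroup data n).map (pvEntry n) := by
  unfold pvBlock pvGroup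
  have h1 : ((PySem.List.enumerate data).filter (fun p => nmF p.2 == n)).map
        (fun p => pvEntry (nmF p.2) (gpF p.2))
      = ((PySem.List.enumerate data).filter (fun p => nmF p.2 == n)).map
        (fun p => pvEntry n (gpF p.2)) := by
    apply List.map_congr_left
    intro p hp
    rw [eq_of_beq (List.mem_filter.mp hp).2]
  rw [h1, pv_enum_filter_map (fun it => nmF it == n) (fun it => pvEntry n (gpF it)) data 0,
    List.map_map]
  rfl

-- ===== VERDICT (by name: the statement is the Claim_ definition above) =====
theorem get_optimal_gpus_spec : Claim_equal_get_optimal_gpus := by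
  intro data num_gpus _ _
  unfold Spec_get_optimal_gpus get_optimal_gpus get_optimal_gpus_alt
  simp only [nmF_def, gpF_def]
  rw [pvAllocA_eq_take, List.nil_append, pv_nodes_items, pv_sortA, List.flatMap_map]
  have hkey : ∀ p ∈ PySem.List.enumerate data,
      toLex (-(PySem.Dict.counter (data.map (fun item => nmF item))).getD (nmF p.2) 0,
        toLex (((PySem.List.enumerate data).foldl
            (fun d p => d.setdefault (nmF p.2) p.1) PySem.Dict.empty).getD (nmF p.2) 0, p.1))
        = pvKeyB data p := by
    intro p hp
    have hc : (PySem.Dict.counter (data.map (fun item => nmF item))).getD (nmF p.2) 0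
        = pvCnt data (nmF p.2) := PySem.Dict.getD_counter _ _
    have hmem : nmF p.2 ∈ pvNames data := by
      obtain ⟨k, hk, rfl⟩ := (PySem.List.mem_enumerate_iff data 0 p).mp hp
      exact List.mem_map_of_mem (List.getElem_mem hk)
    have hf := (pv_first_inv data).2 (nmF p.2) hmem
    rw [hc, hf]
    rfl
  rw [pv_sorted_key_congr (PySem.List.enumerate data) _ (pvKeyB data) hkey, pv_sortB,
    PySem.List.slice_to _ (b := max num_gpus 0) (by omega), List.map_take, List.map_flatMap]
  have hmax : (max num_gpus 0).toNat = num_gpus.toNat := by omega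
  have hbody : ∀ n, (pvBlock data n).map (fun p => pvEntry (nmF p.2) (gpF p.2))
      = (pvF data n).2.map (fun gpu => pvEntry (pvF data n).1 gpu) := by
    intro n; rw [pv_block_map]; rfl
  rw [hmax]
  simp only [hbody]
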